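-- pv_equiv track=rewrite | github.com/justinwojo/spm-to-xcframework | spm-to-xcframework.py | _balanced_close
-- ===== SOURCE A (Python) =====
-- def _balanced_close(text: str, open_idx: int) -> int:
--     """Walk text from `open_idx` (which must point at one of `(`, `[`, `{`)
--     to the matching closing bracket, returning its index. Skips over Swift
--     string literals (`"..."` with `\\"` escapes), `// ...` line comments, and
--     `/* ... */` block comments. Returns -1 if no matching close is found.
--
--     Does NOT handle Swift multi-line triple-quoted strings, raw strings,
--     or string interpolation. Callers should run
--     `_assert_no_unsupported_swift_constructs` on the full manifest text
--     before invoking this walker so unsupported syntax fails loudly with a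
--     targeted PrepareError instead of being silently mis-parsed.
--     """
--     if open_idx < 0 or open_idx >= len(text):
--         return -1
--     open_ch = text[open_idx]
--     pair = {"(": ")", "[": "]", "{": "}"}
--     if open_ch not in pair:
--         return -1
--     close_ch = pair[open_ch]
--
--     depth = 0
--     i = open_idx
--     n = len(text)
--     while i < n:
--         c = text[i]
--         # Line comment: skip to end-of-line.
--         if c == "/" and i + 1 < n and text[i + 1] == "/":
--             nl = text.find("\n", i + 2)
--             if nl == -1:
--                 return -1
--             i = nl + 1
--             continue
--         # Block comment: skip to */
--         if c == "/" and i + 1 < n and text[i + 1] == "*":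
--             close = text.find("*/", i + 2)
--             if close == -1:
--                 return -1
--             i = close + 2
--             continue
--         # String literal: skip to closing quote, honoring `\\"` escapes.
--         if c == '"':
--             i += 1
--             while i < n:
--                 cc = text[i]
--                 if cc == "\\" and i + 1 < n:
--                     i += 2
--                     continue
--                 if cc == '"':
--                     i += 1
--                     break
--                 if cc == "\n":
--                     # Unterminated string — give up rather than misparse.
--                     return -1
--                 i += 1
--             continue
--         if c == open_ch:
--             depth += 1
--         elif c == close_ch:
--             depth -= 1
--             if depth == 0:
--                 return i
--         i += 1
--     return -1
-- ===== SOURCE B (Python) =====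
-- def _balanced_close(text: str, open_idx: int) -> int:
--     """Single character-by-character scan driven by an explicit state machine
--     (NORMAL / STRING / LINE_COMMENT / BLOCK_COMMENT) instead of find()-based
--     span skipping. Returns the index of the matching close bracket, or -1."""
--     if open_idx < 0 or open_idx >= len(text):
--         return -1
--     pair = {"(": ")", "[": "]", "{": "}"}
--     open_ch = text[open_idx]
--     if open_ch not in pair:
--         return -1
--     close_ch = pair[open_ch]
--
--     NORMAL, STRING, LINE, BLOCK = 0, 1, 2, 3
--     state = NORMAL
--     escape = False  # STRING: previous char was an unconsumed backslash
--     star = False    # BLOCK: previous char was '*'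
--     depth = 0
--     i = open_idx
--     n = len(text)
--     while i < n:
--         c = text[i]
--         if state == NORMAL:
--             if c == "/" and i + 1 < n and text[i + 1] == "/":
--                 state = LINE
--                 i += 2
--                 continue
--             if c == "/" and i + 1 < n and text[i + 1] == "*":
--                 state = BLOCK
--                 star = False
--                 i += 2
--                 continue
--             if c == '"':
--                 state = STRING
--                 escape = False
--             elif c == open_ch:
--                 depth += 1
--             elif c == close_ch:
--                 depth -= 1
--                 if depth == 0:
--                     return i
--         elif state == STRING:
--             if escape:
--                 escape = False
--             elif c == "\\":
--                 escape = True
--             elif c == '"':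
--                 state = NORMAL
--             elif c == "\n":
--                 return -1
--         elif state == LINE:
--             if c == "\n":
--                 state = NORMAL
--         else:  # BLOCK
--             if star and c == "/":
--                 state = NORMAL
--             star = c == "*"
--     # reaching EOF inside a comment/string, or with brackets still open: no match
--         i += 1
--     return -1
-- ===== Notes on version B (the rewrite author's own statement) =====
-- stated objective: alternative
-- what changed: Replaces A's str.find-based span skipping (jumping over comments and strings with substring searches) by a single character-by-character loop driven by an explicit state machine (NORMAL/STRING/LINE_COMMENT/BLOCK_COMMENT with escape and star sub-flags).
import Mathlib
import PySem

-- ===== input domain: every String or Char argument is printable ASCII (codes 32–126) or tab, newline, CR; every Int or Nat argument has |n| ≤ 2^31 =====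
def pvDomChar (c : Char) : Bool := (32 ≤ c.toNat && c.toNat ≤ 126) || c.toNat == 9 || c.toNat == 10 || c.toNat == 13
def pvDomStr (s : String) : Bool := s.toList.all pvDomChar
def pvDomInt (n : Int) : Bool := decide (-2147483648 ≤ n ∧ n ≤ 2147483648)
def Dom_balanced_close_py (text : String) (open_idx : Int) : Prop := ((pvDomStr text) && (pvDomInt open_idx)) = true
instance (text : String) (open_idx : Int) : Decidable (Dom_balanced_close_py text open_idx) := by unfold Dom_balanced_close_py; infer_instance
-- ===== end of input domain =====

-- B replaces A's str.find-based span skipping by a single per-character state machine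
-- (NORMAL/STRING/LINE_COMMENT/BLOCK_COMMENT); alternative decomposition, same O(n) cost.


-- ===== PORT A =====
-- text.find("\n", i+2): exact port of str.find for a 1-char needle searched in the
-- suffix starting at the current position; returns the index RELATIVE to that suffix.
def pvFindCharIdx (t : Char) : List Char → Option Nat
  | [] => none
  | c :: tl => if c = t then some 0 else (pvFindCharIdx t tl).map (· + 1)

-- text.find("*/", i+2): exact port of str.find for the 2-char needle "*/" in the suffix.
def pvFindStarSlash : List Char → Option Nat
  | [] => none
  | c :: tl => if c = '*' ∧ tl.head? = some '/' then some 0 else (pvFindStarSlash tl).map (· + 1)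

-- A's inner string-skipping while-loop. `none` means A returns -1 (either the explicit
-- newline return or falling off the end of text, after which the outer loop returns -1).
def pvStrSkipA : List Char → Nat → Option (List Char × Nat)
  | [], _ => none
  | c :: tl, idx =>
    if c = '\\' ∧ tl ≠ [] then pvStrSkipA tl.tail (idx + 2)
    else if c = '"' then some (tl, idx + 1)
    else if c = '\n' then none
    else pvStrSkipA tl (idx + 1)
  termination_by cs _ => cs.length
  decreasing_by all_goals (simp; try omega)

theorem pvStrSkipA_len : ∀ (cs : List Char) (idx : Nat) (r : List Char) (j : Nat),
    pvStrSkipA cs idx = some (r, j) → r.length < cs.length := by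
  intro cs idx
  induction cs, idx using pvStrSkipA.induct with
  | case1 => intro r j h; simp [pvStrSkipA] at h
  | case2 c tl idx' h1 ih =>
    intro r j h
    rw [pvStrSkipA, if_pos h1] at h
    have := ih _ _ h
    cases tl with
    | nil => exact (h1.2 rfl).elim
    | cons d tl2 => simp at this ⊢; omega
  | case3 tl idx' h1 =>
    intro r j h
    rw [pvStrSkipA, if_neg h1] at h
    simp at h
    simp [h.1.symm]
  | case4 tl idx' h1 h2 =>
    intro r j h
    rw [pvStrSkipA, if_neg h1] at h
    simp at h
  | case5 c tl idx' h1 h2 h3 ih =>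
    intro r j h
    rw [pvStrSkipA, if_neg h1, if_neg h2, if_neg h3] at h
    have := ih _ _ h
    simp; omega

-- A's main while-loop: `cs` is the suffix text[i:], `i` the absolute index.
def pvLoopA (oc cc : Char) : List Char → Int → Nat → Int
  | [], _, _ => -1
  | c :: tl, depth, i =>
    if c = '/' ∧ tl.head? = some '/' then
      match pvFindCharIdx '\n' tl.tail with
      | none => -1
      | some k => pvLoopA oc cc (tl.tail.drop (k + 1)) depth (i + 2 + (k + 1))
    else if c = '/' ∧ tl.head? = some '*' then
      match pvFindStarSlash tl.tail with
      | none => -1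
      | some k => pvLoopA oc cc (tl.tail.drop (k + 2)) depth (i + 2 + (k + 2))
    else if c = '"' then
      match h : pvStrSkipA tl (i + 1) with
      | none => -1
      | some (rest, j) => pvLoopA oc cc rest depth j
    else if c = oc then pvLoopA oc cc tl (depth + 1) (i + 1)
    else if c = cc then
      (if depth - 1 = 0 then (i : Int) else pvLoopA oc cc tl (depth - 1) (i + 1))
    else pvLoopA oc cc tl depth (i + 1)
  termination_by cs _ _ => cs.length
  decreasing_by all_goals first
    | (have := pvStrSkipA_len tl (i + 1) rest j h; simp; omega)
    | (simp; try omega)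

def balanced_close_py (text : String) (open_idx : Int) : Int :=
  let cs := text.toList
  if open_idx < 0 ∨ (cs.length : Int) ≤ open_idx then -1
  else
    match cs.drop open_idx.toNat with
    | [] => -1
    | c :: _ =>
      if c = '(' then pvLoopA '(' ')' (cs.drop open_idx.toNat) 0 open_idx.toNat
      else if c = '[' then pvLoopA '[' ']' (cs.drop open_idx.toNat) 0 open_idx.toNat
      else if c = '{' then pvLoopA '{' '}' (cs.drop open_idx.toNat) 0 open_idx.toNat
      else -1

-- ===== PORT B =====
inductive PvBState where
  | normal : PvBState
  | instr : Bool → PvBState   -- Bool: escape flag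
  | line : PvBState
  | block : Bool → PvBState   -- Bool: star flag
  deriving DecidableEq

-- B's single while-loop over characters, state machine.
def pvLoopB (oc cc : Char) : List Char → PvBState → Int → Nat → Int
  | [], _, _, _ => -1
  | c :: tl, st, depth, i =>
    match st with
    | .normal =>
      if c = '/' ∧ tl.head? = some '/' then pvLoopB oc cc tl.tail .line depth (i + 2)
      else if c = '/' ∧ tl.head? = some '*' then pvLoopB oc cc tl.tail (.block false) depth (i + 2)
      else if c = '"' then pvLoopB oc cc tl (.instr false) depth (i + 1)
      else if c = oc then pvLoopB oc cc tl .normal (depth + 1) (i + 1)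
      else if c = cc then
        (if depth - 1 = 0 then (i : Int) else pvLoopB oc cc tl .normal (depth - 1) (i + 1))
      else pvLoopB oc cc tl .normal depth (i + 1)
    | .instr esc =>
      if esc then pvLoopB oc cc tl (.instr false) depth (i + 1)
      else if c = '\\' then pvLoopB oc cc tl (.instr true) depth (i + 1)
      else if c = '"' then pvLoopB oc cc tl .normal depth (i + 1)
      else if c = '\n' then -1
      else pvLoopB oc cc tl (.instr false) depth (i + 1)
    | .line =>
      if c = '\n' then pvLoopB oc cc tl .normal depth (i + 1)
      else pvLoopB oc cc tl .line depth (i + 1)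
    | .block star =>
      if star ∧ c = '/' then pvLoopB oc cc tl .normal depth (i + 1)
      else pvLoopB oc cc tl (.block (c = '*')) depth (i + 1)
  termination_by cs _ _ _ => cs.length
  decreasing_by all_goals (simp; try omega)

def balanced_close_py_alt (text : String) (open_idx : Int) : Int :=
  let cs := text.toList
  if open_idx < 0 ∨ (cs.length : Int) ≤ open_idx then -1
  else
    match cs.drop open_idx.toNat with
    | [] => -1
    | c :: _ =>
      if c = '(' then pvLoopB '(' ')' (cs.drop open_idx.toNat) .normal 0 open_idx.toNat
      else if c = '[' then pvLoopB '[' ']' (cs.drop open_idx.toNat) .normal 0 open_idx.toNat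
      else if c = '{' then pvLoopB '{' '}' (cs.drop open_idx.toNat) .normal 0 open_idx.toNat
      else -1

-- ===== PRECONDITION & SPEC =====
def Spec_balanced_close_py (text : String) (open_idx : Int) (out : Int) : Prop := out = balanced_close_py_alt text open_idx
instance (text : String) (open_idx : Int) (out : Int) : Decidable (Spec_balanced_close_py text open_idx out) := by unfold Spec_balanced_close_py; infer_instance

-- ===== CLAIM (what is proved, stated in full; the proofs are below) =====
def Claim_equal_balanced_close_py : Prop := ∀ (text : String) (open_idx : Int), Dom_balanced_close_py text open_idx → Spec_balanced_close_py text open_idx (balanced_close_py text open_idx)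

-- ===== LEMMAS AND PROOFS =====

theorem pv_lineEq (oc cc : Char) : ∀ (cs : List Char) (depth : Int) (i : Nat),
    pvLoopB oc cc cs .line depth i =
      match pvFindCharIdx '\n' cs with
      | none => -1
      | some k => pvLoopB oc cc (cs.drop (k + 1)) .normal depth (i + (k + 1)) := by
  intro cs
  induction cs with
  | nil => intro depth i; simp [pvLoopB, pvFindCharIdx]
  | cons c tl ih =>
    intro depth i
    by_cases hc : c = '\n'
    · subst hc; simp [pvLoopB, pvFindCharIdx]
    · simp only [pvLoopB, pvFindCharIdx, if_neg hc]
      rw [ih]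
      cases hf : pvFindCharIdx '\n' tl with
      | none => simp
      | some k =>
        simp only [Option.map_some]
        rw [List.drop_succ_cons]
        congr 1
        omega

-- proof-side helper: first index of the '/' completing "*/" given pending-star flag s
def pvFindSS2 (s : Bool) : List Char → Option Nat
  | [] => none
  | c :: tl => if s ∧ c = '/' then some 0 else (pvFindSS2 (c = '*') tl).map (· + 1)

theorem pv_blockGen (oc cc : Char) : ∀ (cs : List Char) (s : Bool) (depth : Int) (i : Nat),
    pvLoopB oc cc cs (.block s) depth i =
      match pvFindSS2 s cs with
      | none => -1
      | some j => pvLoopB oc cc (cs.drop (j + 1)) .normal depth (i + (j + 1)) := by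
  intro cs
  induction cs with
  | nil => intro s depth i; simp [pvLoopB, pvFindSS2]
  | cons c tl ih =>
    intro s depth i
    by_cases hc : s ∧ c = '/'
    · simp [pvLoopB, pvFindSS2, hc]
    · simp only [pvLoopB, pvFindSS2, if_neg hc]
      rw [ih]
      cases hf : pvFindSS2 (c = '*') tl with
      | none => simp
      | some j =>
        simp only [Option.map_some]
        rw [List.drop_succ_cons]
        congr 1
        omega

theorem pvFindSS2_false : ∀ (cs : List Char),
    pvFindSS2 false cs = (pvFindStarSlash cs).map (· + 1) := by
  intro cs
  induction cs with
  | nil => simp [pvFindSS2, pvFindStarSlash]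
  | cons c tl ih =>
    by_cases hc : c = '*'
    · subst hc
      cases tl with
      | nil => simp [pvFindSS2, pvFindStarSlash]
      | cons d tl2 =>
        by_cases hd : d = '/'
        · subst hd; simp [pvFindSS2, pvFindStarSlash]
        · have ih' : (pvFindSS2 (decide (d = '*')) tl2).map (· + 1)
              = (pvFindStarSlash (d :: tl2)).map (· + 1) := by
            rw [← ih]; simp [pvFindSS2]
          have e1 : pvFindSS2 false ('*' :: d :: tl2)
              = ((pvFindSS2 (decide (d = '*')) tl2).map (· + 1)).map (· + 1) := by
            rw [pvFindSS2, if_neg (by simp), pvFindSS2, if_neg (by simp [hd])]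
          have e2 : pvFindStarSlash ('*' :: d :: tl2)
              = (pvFindStarSlash (d :: tl2)).map (· + 1) := by
            rw [pvFindStarSlash, if_neg (by simp [hd])]
          rw [e1, e2, ih', Option.map_map]
    · rw [pvFindSS2, if_neg (by simp), pvFindStarSlash, if_neg (by simp [hc])]
      rw [show (decide (c = '*')) = false by simp [hc], ih, Option.map_map]

theorem pv_strEq (oc cc : Char) : ∀ (cs : List Char) (i : Nat) (depth : Int),
    pvLoopB oc cc cs (.instr false) depth i =
      match pvStrSkipA cs i with
      | none => -1
      | some (rest, j) => pvLoopB oc cc rest .normal depth j := by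
  intro cs i
  induction cs, i using pvStrSkipA.induct with
  | case1 idx => intro depth; simp [pvLoopB, pvStrSkipA]
  | case2 c tl idx h1 ih =>
    intro depth
    obtain ⟨hc, hne⟩ := h1
    subst hc
    cases tl with
    | nil => exact (hne rfl).elim
    | cons d tl2 =>
      rw [pvStrSkipA, if_pos ⟨rfl, by simp⟩]
      simp only [pvLoopB, List.tail_cons] at ih ⊢
      simpa using ih depth
  | case3 tl idx h1 =>
    intro depth
    rw [pvStrSkipA, if_neg h1]
    simp [pvLoopB]
  | case4 tl idx h1 h2 =>
    intro depth
    rw [pvStrSkipA, if_neg h1]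
    simp [pvLoopB]
  | case5 c tl idx h1 h2 h3 ih =>
    intro depth
    by_cases hbs : c = '\\'
    · subst hbs
      cases tl with
      | nil => simp [pvLoopB, pvStrSkipA]
      | cons d tl2 => exact absurd ⟨rfl, by simp⟩ h1
    · rw [pvStrSkipA, if_neg h1, if_neg h2, if_neg h3]
      rw [pvLoopB]
      simp only [if_neg hbs, if_neg h2, if_neg h3]
      exact ih depth

theorem pv_main (oc cc : Char) : ∀ (n : Nat) (cs : List Char), cs.length ≤ n →
    ∀ (depth : Int) (i : Nat), pvLoopA oc cc cs depth i = pvLoopB oc cc cs .normal depth i := by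
  intro n
  induction n with
  | zero =>
    intro cs h depth i
    cases cs with
    | nil => simp [pvLoopA, pvLoopB]
    | cons c tl => simp at h
  | succ n ih =>
    intro cs hlen depth i
    cases cs with
    | nil => simp [pvLoopA, pvLoopB]
    | cons c tl =>
      have htl : tl.length ≤ n := by simp at hlen; omega
      rw [pvLoopA, pvLoopB]
      by_cases h1 : c = '/' ∧ tl.head? = some '/'
      · rw [if_pos h1, if_pos h1, pv_lineEq]
        cases hf : pvFindCharIdx '\n' tl.tail with
        | none => rfl
        | some k =>
          exact ih _ (by cases tl <;> simp_all <;> try omega) _ _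
      · rw [if_neg h1, if_neg h1]
        by_cases h2 : c = '/' ∧ tl.head? = some '*'
        · rw [if_pos h2, if_pos h2, pv_blockGen, pvFindSS2_false]
          cases hf : pvFindStarSlash tl.tail with
          | none => rfl
          | some k =>
            simp only [Option.map_some]
            exact ih _ (by cases tl <;> simp_all <;> try omega) _ _
        · rw [if_neg h2, if_neg h2]
          by_cases h3 : c = '"'
          · rw [if_pos h3, if_pos h3, pv_strEq]
            cases hss : pvStrSkipA tl (i + 1) with
            | none => simp
            | some p =>
              obtain ⟨rest, j⟩ := p
              have hlt := pvStrSkipA_len tl (i + 1) rest j hss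
              exact ih _ (by omega) _ _
          · rw [if_neg h3, if_neg h3]
            by_cases h4 : c = oc
            · rw [if_pos h4, if_pos h4]; exact ih _ htl _ _
            · rw [if_neg h4, if_neg h4]
              by_cases h5 : c = cc
              · rw [if_pos h5, if_pos h5]
                by_cases h6 : depth - 1 = 0
                · rw [if_pos h6, if_pos h6]
                · rw [if_neg h6, if_neg h6]; exact ih _ htl _ _
              · rw [if_neg h5, if_neg h5]; exact ih _ htl _ _

-- ===== VERDICT (by name: the statement is the Claim_ definition above) =====
theorem balanced_close_py_spec : Claim_equal_balanced_close_py := by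
  intro text open_idx _
  unfold Spec_balanced_close_py balanced_close_py balanced_close_py_alt
  simp only
  split_ifs with h
  · rfl
  · cases hd : (text.toList.drop open_idx.toNat) with
    | nil => rfl
    | cons c tl =>
      dsimp only
      split_ifs <;> first | rfl | exact pv_main _ _ _ _ le_rfl _ _
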